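-- pv_equiv track=rewrite | github.com/rajpurkar/python-practice | a.py | numberOfWays2
-- ===== SOURCE A (Python) =====
-- def numberOfWays2(startPos: int, endPos: int, k: int) -> int:
--     if k == 0:
--         if startPos == endPos:
--             return 1
--         return 0
--     if endPos - startPos > k:
--         return 0
--     return (
--         numberOfWays2(startPos-1, endPos, k -1)
--         #numberOfWays2(startPos+1, endPos, k -1)
--         + numberOfWays2(startPos+1, endPos, k -1)
--     )
-- ===== SOURCE B (Python) =====
-- def numberOfWays2(startPos: int, endPos: int, k: int) -> int:
--     # closed form: among k steps of +-1, need (k+d)/2 steps of +1 where d = endPos - startPos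
--     d = endPos - startPos
--     if k < 0 or abs(d) > k or (k + d) % 2 != 0:
--         return 0
--     r = (k + d) // 2
--     res = 1
--     for i in range(1, r + 1):
--         res = res * (k - r + i) // i
--     return res
-- ===== Notes on version B (the rewrite author's own statement) =====
-- stated objective: simpler
-- what changed: Replaced the two-way branching recursion by the closed-form binomial coefficient C(k,(k+d)/2) (d = endPos-startPos) with a sign/range/parity check, computed by a short multiplicative loop.
import Mathlib
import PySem

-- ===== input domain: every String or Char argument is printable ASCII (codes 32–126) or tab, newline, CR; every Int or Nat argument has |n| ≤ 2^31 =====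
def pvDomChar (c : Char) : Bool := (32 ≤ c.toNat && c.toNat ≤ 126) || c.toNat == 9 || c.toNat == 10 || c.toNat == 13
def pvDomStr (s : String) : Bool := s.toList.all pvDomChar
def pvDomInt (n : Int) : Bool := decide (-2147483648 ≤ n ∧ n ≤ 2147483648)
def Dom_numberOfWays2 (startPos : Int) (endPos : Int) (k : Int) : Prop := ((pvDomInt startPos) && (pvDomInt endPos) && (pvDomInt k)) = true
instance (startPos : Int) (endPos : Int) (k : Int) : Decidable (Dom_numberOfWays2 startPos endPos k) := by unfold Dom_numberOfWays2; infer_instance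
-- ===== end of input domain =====

-- B computes the closed-form binomial C(k,(k+d)/2), d = endPos-startPos, instead of A's two-way branching recursion; equivalence of return values on Pre_.

-- ===== PORT A =====
-- Python A recurses on k without a guard for negative k; the fuel k.toNat is exactly
-- the recursion depth the Python run uses when it terminates.
def numberOfWays2Go (fuel : Nat) (startPos : Int) (endPos : Int) (k : Int) : Int :=
  if k = 0 then (if startPos = endPos then 1 else 0)
  else if endPos - startPos > k then 0
  else match fuel with
    | 0 => 0  -- unreachable on Pre_: Python would recurse forever (RecursionError)
    | f + 1 => numberOfWays2Go f (startPos - 1) endPos (k - 1)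
             + numberOfWays2Go f (startPos + 1) endPos (k - 1)

def numberOfWays2 (startPos : Int) (endPos : Int) (k : Int) : Int :=
  numberOfWays2Go k.toNat startPos endPos k

-- ===== PORT B =====
def numberOfWays2_alt (startPos : Int) (endPos : Int) (k : Int) : Int :=
  let d := endPos - startPos
  if k < 0 ∨ |d| > k ∨ PySem.Int.mod (k + d) 2 ≠ 0 then 0
  else
    let r := PySem.Int.floordiv (k + d) 2
    (PySem.List.pyRange 1 (r + 1) 1).foldl
      (fun res i => PySem.Int.floordiv (res * (k - r + i)) i) 1

-- ===== PRECONDITION & SPEC =====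
-- Pre_ excludes exactly the inputs where Python A raises RecursionError instead of
-- returning: k < 0 with endPos - startPos ≤ k (unbounded recursion), and k ≥ 998 with
-- endPos - startPos ≤ k, where A's DFS nests k frames deep and hits CPython's default
-- 1000-frame recursion limit (measured: top-level calls raise from k = 998 on).
def Pre_numberOfWays2 (startPos : Int) (endPos : Int) (k : Int) : Prop :=
  (k < 0 → endPos - startPos > k) ∧ (endPos - startPos ≤ k → k < 998)
instance (startPos : Int) (endPos : Int) (k : Int) : Decidable (Pre_numberOfWays2 startPos endPos k) := by unfold Pre_numberOfWays2; infer_instance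

def pvWitness_numberOfWays2 : Int × Int × Int := (0, 2, 4)

def Spec_numberOfWays2 (startPos : Int) (endPos : Int) (k : Int) (out : Int) : Prop := out = numberOfWays2_alt startPos endPos k
instance (startPos : Int) (endPos : Int) (k : Int) (out : Int) : Decidable (Spec_numberOfWays2 startPos endPos k out) := by unfold Spec_numberOfWays2; infer_instance

-- ===== CLAIM (what is proved, stated in full; the proofs are below) =====
def Claim_equal_numberOfWays2 : Prop := ∀ (startPos : Int) (endPos : Int) (k : Int), Dom_numberOfWays2 startPos endPos k → Pre_numberOfWays2 startPos endPos k → Spec_numberOfWays2 startPos endPos k (numberOfWays2 startPos endPos k)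

-- ===== LEMMAS AND PROOFS =====

-- The mathematical value: W k d = C(k, (d+k)/2) when |d| ≤ k and d+k is even, else 0.
def W (k : Nat) (d : Int) : Int :=
  if d.natAbs ≤ k ∧ (d + k).toNat % 2 = 0 then ((k.choose ((d + k).toNat / 2) : Nat) : Int) else 0

theorem W_of_gt (k : Nat) (d : Int) (h : k < d.natAbs) : W k d = 0 := by
  simp [W]; omega

theorem W_pascal (k : Nat) (d : Int) (hle : d ≤ (k : Int) + 1) :
    W (k + 1) d = W k (d + 1) + W k (d - 1) := by
  by_cases hlo : d < -((k : Int) + 1)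
  · rw [W_of_gt, W_of_gt, W_of_gt] <;> omega
  · -- |d| ≤ k+1
    by_cases hpar : (d + (k + 1)).toNat % 2 = 0
    · -- parity even: the choose recurrence
      have hd0 : (0:Int) ≤ d + (k + 1) := by omega
      set m : Nat := (d + ((k:Int) + 1)).toNat with hm
      have hmd : d = (m : Int) - (k + 1) := by omega
      have hm2 : m ≤ 2 * (k + 1) := by omega
      rcases Nat.eq_zero_or_pos m with h0 | hpos
      · -- d = -(k+1): only W k (d+1) contributes, both sides 1
        have h1 : W (k+1) d = 1 := by
          simp only [W]; rw [if_pos (by constructor <;> omega)]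
          have hz : (d + ((k+1:Nat):Int)).toNat / 2 = 0 := by push_cast; omega
          rw [hz, Nat.choose_zero_right]; norm_num
        have h2 : W k (d + 1) = 1 := by
          simp only [W]; rw [if_pos (by constructor <;> omega)]
          have hz : (d + 1 + ((k:Nat):Int)).toNat / 2 = 0 := by omega
          rw [hz, Nat.choose_zero_right]; norm_num
        have h3 : W k (d - 1) = 0 := W_of_gt _ _ (by omega)
        rw [h1, h2, h3]; ring
      · rcases Nat.eq_or_lt_of_le hm2 with htop | hlt
        · -- d = k+1: only W k (d-1) contributes
          have h1 : W (k+1) d = 1 := by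
            simp only [W]; rw [if_pos (by constructor <;> omega)]
            have hz : (d + ((k+1:Nat):Int)).toNat / 2 = k + 1 := by push_cast; omega
            rw [hz, Nat.choose_self]; norm_num
          have h2 : W k (d + 1) = 0 := W_of_gt _ _ (by omega)
          have h3 : W k (d - 1) = 1 := by
            simp only [W]; rw [if_pos (by constructor <;> omega)]
            have hz : (d - 1 + ((k:Nat):Int)).toNat / 2 = k := by omega
            rw [hz, Nat.choose_self]; norm_num
          rw [h1, h2, h3]; ring
        · -- interior: Pascal
          have hL : W (k+1) d = ((k+1).choose (m / 2) : Nat) := by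
            simp only [W]; rw [if_pos (by constructor <;> omega)]
            have hz : (d + ((k+1:Nat):Int)).toNat = m := by push_cast; omega
            rw [hz]
          have hR1 : W k (d + 1) = (k.choose (m / 2) : Nat) := by
            simp only [W]; rw [if_pos (by constructor <;> omega)]
            have hz : (d + 1 + ((k:Nat):Int)).toNat / 2 = m / 2 := by omega
            rw [hz]
          have hR2 : W k (d - 1) = (k.choose (m / 2 - 1) : Nat) := by
            simp only [W]; rw [if_pos (by constructor <;> omega)]
            have hz : (d - 1 + ((k:Nat):Int)).toNat / 2 = m / 2 - 1 := by omega
            rw [hz]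
          rw [hL, hR1, hR2]
          have hpos2 : 0 < m / 2 := by omega
          have hp := Nat.choose_succ_succ k (m / 2 - 1)
          simp only [Nat.succ_eq_add_one, show m / 2 - 1 + 1 = m / 2 by omega] at hp
          rw [hp]; push_cast; ring
    · -- parity odd: everything 0
      have e1 : W (k+1) d = 0 := by simp only [W]; rw [if_neg]; omega
      have e2 : W k (d+1) = 0 := by
        simp only [W]
        by_cases h : (d+1).natAbs ≤ k
        · rw [if_neg]; omega
        · rw [if_neg]; omega
      have e3 : W k (d-1) = 0 := by
        simp only [W]
        by_cases h : (d-1).natAbs ≤ k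
        · rw [if_neg]; omega
        · rw [if_neg]; omega
      rw [e1, e2, e3]; ring

-- A's recursion computes W (fuel is sufficient for k ≥ 0).
theorem go_eq_W (fuel : Nat) : ∀ (k : Nat) (s e : Int), k ≤ fuel →
    numberOfWays2Go fuel s e (k : Int) = W k (e - s) := by
  induction fuel with
  | zero =>
    intro k s e hk
    interval_cases k
    simp only [numberOfWays2Go, W]
    split_ifs with h1 h2 h3 <;> simp_all <;> omega
  | succ f ih =>
    intro k s e hk
    match k with
    | 0 =>
      simp only [numberOfWays2Go, W]
      split_ifs with h1 h2 h3 <;> simp_all <;> omega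
    | k + 1 =>
      rw [numberOfWays2Go]
      rw [if_neg (by omega)]
      by_cases hgt : e - s > ((k:Int) + 1)
      · push_cast
        rw [if_pos (by push_cast; omega), W_of_gt _ _ (by omega)]
      · push_cast
        rw [if_neg (by push_cast; omega)]
        have h1 : ((k:Int) + 1 - 1) = (k : Nat) := by push_cast; ring
        rw [h1, ih k (s-1) e (by omega), ih k (s+1) e (by omega),
            W_pascal k (e - s) (by omega)]
        congr 1 <;> congr 1 <;> ring

-- B's product loop computes the binomial coefficient: after j steps, res = C(m+j, j).
theorem loop_choose (m : Nat) : ∀ (j : Nat),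
    (PySem.List.pyRange 1 ((j : Int) + 1) 1).foldl
      (fun res i => PySem.Int.floordiv (res * ((m : Int) + i)) i) 1
      = (((m + j).choose j : Nat) : Int) := by
  intro j
  induction j with
  | zero => simp [PySem.List.pyRange_one_eq_nil]
  | succ j ih =>
    push_cast
    rw [PySem.List.pyRange_one_succ_right (by omega), List.foldl_append]
    have ih' := ih
    push_cast at ih'
    rw [ih']
    simp only [List.foldl]
    have keyN : (m + j).choose j * (m + j + 1) = (j + 1) * ((m + (j + 1)).choose (j + 1)) := by
      have h := Nat.succ_mul_choose_eq (m + j) j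
      simp only [Nat.succ_eq_add_one, show m + j + 1 = m + (j + 1) from by omega] at h
      simp only [show m + j + 1 = m + (j + 1) from by omega]
      rw [Nat.mul_comm ((m + j).choose j), h, Nat.mul_comm]
    have key : (((m + j).choose j : Nat) : Int) * ((m : Int) + ((j:Int) + 1))
        = ((j:Int) + 1) * (((m + (j+1)).choose (j+1) : Nat) : Int) := by
      exact_mod_cast keyN
    rw [key, PySem.Int.floordiv_eq_ediv_of_pos (by omega),
        Int.mul_ediv_cancel_left _ (by omega)]

theorem alt_eq_W (s e : Int) (k : Nat) : numberOfWays2_alt s e (k : Int) = W k (e - s) := by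
  simp only [numberOfWays2_alt]
  by_cases hcond : ((k:Int) < 0 ∨ |e - s| > (k:Int) ∨ PySem.Int.mod ((k:Int) + (e - s)) 2 ≠ 0)
  · rw [if_pos hcond, W, eq_comm, if_neg]
    rcases hcond with h | h | h
    · omega
    · rw [gt_iff_lt, lt_abs] at h; omega
    · rw [PySem.Int.mod_eq_emod_of_pos (by omega)] at h
      intro hc; exact h (by omega)
  · rw [if_neg hcond]
    push_neg at hcond
    obtain ⟨-, habs, hmod⟩ := hcond
    rw [abs_le] at habs
    rw [PySem.Int.mod_eq_emod_of_pos (by omega)] at hmod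
    have hfd : PySem.Int.floordiv ((k:Int) + (e - s)) 2 = ((((k:Int) + (e - s)).toNat / 2 : Nat) : Int) := by
      rw [PySem.Int.floordiv_eq_ediv_of_pos (by omega)]; omega
    set R : Nat := ((k:Int) + (e - s)).toNat / 2 with hR
    have hRk : R ≤ k := by omega
    rw [hfd]
    have hfun : (fun res i => PySem.Int.floordiv (res * ((k:Int) - ((R:Nat):Int) + i)) i)
        = (fun res i => PySem.Int.floordiv (res * (((k - R : Nat) : Int) + i)) i) := by
      funext res i; congr 2; push_cast; omega
    rw [hfun, loop_choose (k - R) R]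
    rw [W, if_pos (by constructor <;> omega)]
    have h1 : k - R + R = k := by omega
    have h2 : (e - s + ((k:Nat):Int)).toNat / 2 = R := by omega
    rw [h1, h2]

-- ===== VERDICT (by name: the statement is the Claim_ definition above) =====
theorem numberOfWays2_spec : Claim_equal_numberOfWays2 := by
  intro s e k _ hpre
  unfold Spec_numberOfWays2 numberOfWays2
  by_cases hk : 0 ≤ k
  · obtain ⟨n, rfl⟩ := Int.eq_ofNat_of_zero_le hk
    rw [go_eq_W _ n s e (by omega), alt_eq_W]
  · -- k < 0: A returns 0 via the e - s > k branch; B returns 0 via k < 0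
    have hgt := hpre.1 (by omega)
    rw [show k.toNat = 0 by omega]
    rw [numberOfWays2Go, if_neg (by omega), if_pos hgt]
    rw [numberOfWays2_alt]
    rw [if_pos (Or.inl (by omega))]
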